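-- pv_equiv track=rewrite | github.com/ShirRinghao/CSCI4390 | hw7/assign7.py | shatter_data
-- ===== SOURCE A (Python) =====
-- def initialize_cluster(k):
--     cluster = {}
--     for i in range(k):
--         cluster[i] = []
--     return cluster
--
-- def shatter_data(data):
--     '''
--     classify the data into six
--     '''
--     t_cluster = initialize_cluster(6)
--     for row in data:
--         if(10 <= row[0] <= 40):
--             t_cluster[0].append(list(row[1:]))
--         elif row[0] == 50:
--             t_cluster[1].append(list(row[1:]))
--         elif row[0] == 60:
--             t_cluster[2].append(list(row[1:]))
--         elif 70 <= row[0] <= 90: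
--             t_cluster[3].append(list(row[1:]))
--         elif 100 <= row[0] <= 160:
--             t_cluster[4].append(list(row[1:]))
--         elif 170 <= row[0] <= 1080:
--             t_cluster[5].append(list(row[1:]))
--     return t_cluster
-- ===== SOURCE B (Python) =====
-- RANGES = [(10, 40, 0), (50, 50, 1), (60, 60, 2),
--           (70, 90, 3), (100, 160, 4), (170, 1080, 5)]
--
-- def shatter_data(data):
--     '''
--     classify the data into six
--     '''
--     return {idx: [list(row[1:]) for row in data if lo <= row[0] <= hi]
--             for lo, hi, idx in RANGES}
-- ===== Notes on version B (the rewrite author's own statement) =====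
-- stated objective: idiomatic
-- what changed: Replaces the mutable six-bucket dict updated row-by-row through an elif chain with a declarative dict comprehension over a constant (lo, hi, idx) range table, building each cluster as one filter-and-slice comprehension over the data.
import Mathlib
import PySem

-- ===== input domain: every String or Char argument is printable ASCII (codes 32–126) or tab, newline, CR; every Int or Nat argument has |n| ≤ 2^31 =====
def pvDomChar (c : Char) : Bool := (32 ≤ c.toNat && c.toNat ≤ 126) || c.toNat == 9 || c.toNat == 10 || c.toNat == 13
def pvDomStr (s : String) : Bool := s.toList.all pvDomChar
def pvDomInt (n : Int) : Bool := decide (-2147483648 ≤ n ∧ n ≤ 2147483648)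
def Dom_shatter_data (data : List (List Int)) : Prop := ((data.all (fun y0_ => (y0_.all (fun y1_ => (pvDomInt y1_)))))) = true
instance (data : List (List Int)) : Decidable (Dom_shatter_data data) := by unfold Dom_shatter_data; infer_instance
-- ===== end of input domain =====

-- B replaces A's row-by-row elif dispatch into a mutable dict by a per-bucket
-- filter comprehension over a constant range table (idiomatic; return value only).

-- ===== PORT A =====
def initialize_cluster (k : Int) : PySem.Dict Int (List (List Int)) :=
  (PySem.List.pyRange 0 k 1).foldl (fun c i => c.insert i []) PySem.Dict.empty

def shatter_data (data : List (List Int)) : List (Int × List (List Int)) :=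
  (data.foldl (fun t row =>
      let x := PySem.List.pyGetD row 0 0
      if 10 ≤ x ∧ x ≤ 40 then t.modify 0 [] (· ++ [PySem.List.slice row (some 1) none])
      else if x = 50 then t.modify 1 [] (· ++ [PySem.List.slice row (some 1) none])
      else if x = 60 then t.modify 2 [] (· ++ [PySem.List.slice row (some 1) none])
      else if 70 ≤ x ∧ x ≤ 90 then t.modify 3 [] (· ++ [PySem.List.slice row (some 1) none])
      else if 100 ≤ x ∧ x ≤ 160 then t.modify 4 [] (· ++ [PySem.List.slice row (some 1) none])
      else if 170 ≤ x ∧ x ≤ 1080 then t.modify 5 [] (· ++ [PySem.List.slice row (some 1) none])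
      else t)
    (initialize_cluster 6)).items

-- ===== PORT B =====
def clusterRanges : List (Int × Int × Int) :=
  [(10, 40, 0), (50, 50, 1), (60, 60, 2), (70, 90, 3), (100, 160, 4), (170, 1080, 5)]

def shatter_data_alt (data : List (List Int)) : List (Int × List (List Int)) :=
  clusterRanges.map (fun r =>
    (r.2.2, (data.filter (fun row =>
        decide (r.1 ≤ PySem.List.pyGetD row 0 0 ∧ PySem.List.pyGetD row 0 0 ≤ r.2.1))).map
      (fun row => PySem.List.slice row (some 1) none)))

-- ===== PRECONDITION & SPEC =====
-- Pre_ excludes data containing an empty row: there row[0] raises IndexError in both A and B.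
def Pre_shatter_data (data : List (List Int)) : Prop := ∀ row ∈ data, row ≠ []
instance (data : List (List Int)) : Decidable (Pre_shatter_data data) := by unfold Pre_shatter_data; infer_instance

def pvWitness_shatter_data : List (List Int) := [[10, 1, 2], [50, 3], [45], [200, 7]]

def Spec_shatter_data (data : List (List Int)) (out : List (Int × List (List Int))) : Prop := out = shatter_data_alt data
instance (data : List (List Int)) (out : List (Int × List (List Int))) : Decidable (Spec_shatter_data data out) := by unfold Spec_shatter_data; infer_instance

-- ===== CLAIM (what is proved, stated in full; the proofs are below) =====
def Claim_equal_shatter_data : Prop := ∀ (data : List (List Int)), Dom_shatter_data data → Pre_shatter_data data → Spec_shatter_data data (shatter_data data)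

-- ===== LEMMAS AND PROOFS =====

-- one bucket of B: rows whose first entry is in [lo, hi], tails kept in order
def bucketF (lo hi : Int) (d : List (List Int)) : List (List Int) :=
  (d.filter (fun row =>
      decide (lo ≤ PySem.List.pyGetD row 0 0 ∧ PySem.List.pyGetD row 0 0 ≤ hi))).map
    (fun row => PySem.List.slice row (some 1) none)

lemma bucketF_cons (lo hi : Int) (row : List Int) (d : List (List Int)) :
    bucketF lo hi (row :: d) =
      (if lo ≤ PySem.List.pyGetD row 0 0 ∧ PySem.List.pyGetD row 0 0 ≤ hi
       then PySem.List.slice row (some 1) none :: bucketF lo hi d else bucketF lo hi d) := by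
  simp only [bucketF, List.filter_cons]
  split_ifs with h h' <;> simp_all

lemma shatter_fold_items (d : List (List Int)) (l0 l1 l2 l3 l4 l5 : List (List Int)) :
    (d.foldl (fun t row =>
      let x := PySem.List.pyGetD row 0 0
      if 10 ≤ x ∧ x ≤ 40 then t.modify 0 [] (· ++ [PySem.List.slice row (some 1) none])
      else if x = 50 then t.modify 1 [] (· ++ [PySem.List.slice row (some 1) none])
      else if x = 60 then t.modify 2 [] (· ++ [PySem.List.slice row (some 1) none])
      else if 70 ≤ x ∧ x ≤ 90 then t.modify 3 [] (· ++ [PySem.List.slice row (some 1) none])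
      else if 100 ≤ x ∧ x ≤ 160 then t.modify 4 [] (· ++ [PySem.List.slice row (some 1) none])
      else if 170 ≤ x ∧ x ≤ 1080 then t.modify 5 [] (· ++ [PySem.List.slice row (some 1) none])
      else t)
      (PySem.Dict.mk [((0 : Int), l0), (1, l1), (2, l2), (3, l3), (4, l4), (5, l5)])).items
    = [(0, l0 ++ bucketF 10 40 d), (1, l1 ++ bucketF 50 50 d), (2, l2 ++ bucketF 60 60 d),
       (3, l3 ++ bucketF 70 90 d), (4, l4 ++ bucketF 100 160 d), (5, l5 ++ bucketF 170 1080 d)] := by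
  induction d generalizing l0 l1 l2 l3 l4 l5 with
  | nil => simp [bucketF]
  | cons row d ih =>
    simp only [List.foldl_cons]
    have m0 : ∀ v : List Int, (PySem.Dict.mk [((0 : Int), l0), (1, l1), (2, l2), (3, l3), (4, l4), (5, l5)]).modify (0 : Int) [] (· ++ [v]) = PySem.Dict.mk [((0 : Int), l0 ++ [v]), (1, l1), (2, l2), (3, l3), (4, l4), (5, l5)] := by
      intro v; simp [PySem.Dict.modify, PySem.Dict.getD, PySem.Dict.get?, PySem.Dict.insert]
    have m1 : ∀ v : List Int, (PySem.Dict.mk [((0 : Int), l0), (1, l1), (2, l2), (3, l3), (4, l4), (5, l5)]).modify (1 : Int) [] (· ++ [v]) = PySem.Dict.mk [((0 : Int), l0), (1, l1 ++ [v]), (2, l2), (3, l3), (4, l4), (5, l5)] := by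
      intro v; simp [PySem.Dict.modify, PySem.Dict.getD, PySem.Dict.get?, PySem.Dict.insert]
    have m2 : ∀ v : List Int, (PySem.Dict.mk [((0 : Int), l0), (1, l1), (2, l2), (3, l3), (4, l4), (5, l5)]).modify (2 : Int) [] (· ++ [v]) = PySem.Dict.mk [((0 : Int), l0), (1, l1), (2, l2 ++ [v]), (3, l3), (4, l4), (5, l5)] := by
      intro v; simp [PySem.Dict.modify, PySem.Dict.getD, PySem.Dict.get?, PySem.Dict.insert]
    have m3 : ∀ v : List Int, (PySem.Dict.mk [((0 : Int), l0), (1, l1), (2, l2), (3, l3), (4, l4), (5, l5)]).modify (3 : Int) [] (· ++ [v]) = PySem.Dict.mk [((0 : Int), l0), (1, l1), (2, l2), (3, l3 ++ [v]), (4, l4), (5, l5)] := by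
      intro v; simp [PySem.Dict.modify, PySem.Dict.getD, PySem.Dict.get?, PySem.Dict.insert]
    have m4 : ∀ v : List Int, (PySem.Dict.mk [((0 : Int), l0), (1, l1), (2, l2), (3, l3), (4, l4), (5, l5)]).modify (4 : Int) [] (· ++ [v]) = PySem.Dict.mk [((0 : Int), l0), (1, l1), (2, l2), (3, l3), (4, l4 ++ [v]), (5, l5)] := by
      intro v; simp [PySem.Dict.modify, PySem.Dict.getD, PySem.Dict.get?, PySem.Dict.insert]
    have m5 : ∀ v : List Int, (PySem.Dict.mk [((0 : Int), l0), (1, l1), (2, l2), (3, l3), (4, l4), (5, l5)]).modify (5 : Int) [] (· ++ [v]) = PySem.Dict.mk [((0 : Int), l0), (1, l1), (2, l2), (3, l3), (4, l4), (5, l5 ++ [v])] := by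
      intro v; simp [PySem.Dict.modify, PySem.Dict.getD, PySem.Dict.get?, PySem.Dict.insert]
    split_ifs with h1 h2 h3 h4 h5 h6 <;>
      (try simp only [m0, m1, m2, m3, m4, m5]) <;>
      rw [ih,
        bucketF_cons 10 40 row d, bucketF_cons 50 50 row d, bucketF_cons 60 60 row d,
        bucketF_cons 70 90 row d, bucketF_cons 100 160 row d, bucketF_cons 170 1080 row d] <;>
      [ (rw [if_pos (by omega), if_neg (by omega), if_neg (by omega), if_neg (by omega),
             if_neg (by omega), if_neg (by omega)]; simp);
        (rw [if_neg (by omega), if_pos (by omega), if_neg (by omega), if_neg (by omega),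
             if_neg (by omega), if_neg (by omega)]; simp);
        (rw [if_neg (by omega), if_neg (by omega), if_pos (by omega), if_neg (by omega),
             if_neg (by omega), if_neg (by omega)]; simp);
        (rw [if_neg (by omega), if_neg (by omega), if_neg (by omega), if_pos (by omega),
             if_neg (by omega), if_neg (by omega)]; simp);
        (rw [if_neg (by omega), if_neg (by omega), if_neg (by omega), if_neg (by omega),
             if_pos (by omega), if_neg (by omega)]; simp);
        (rw [if_neg (by omega), if_neg (by omega), if_neg (by omega), if_neg (by omega),
             if_neg (by omega), if_pos (by omega)]; simp);
        (rw [if_neg (by omega), if_neg (by omega), if_neg (by omega), if_neg (by omega),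
             if_neg (by omega), if_neg (by omega)]) ]

lemma initialize_cluster_six :
    initialize_cluster 6 =
      PySem.Dict.mk [((0 : Int), []), (1, []), (2, []), (3, []), (4, []), (5, [])] := by
  decide

-- ===== VERDICT (by name: the statement is the Claim_ definition above) =====
theorem shatter_data_spec : Claim_equal_shatter_data := by
  intro data _ _
  unfold Spec_shatter_data shatter_data
  rw [initialize_cluster_six, shatter_fold_items]
  simp [shatter_data_alt, clusterRanges, bucketF]
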